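-- pv_equiv track=rewrite | github.com/NguyenAnh2003/vmd-production | test/edit_distance.py | preprocess_predict
-- ===== SOURCE A (Python) =====
-- def preprocess_predict(predict, input_size):
--     pred = []
--     for i in range(len(predict[:input_size])):
--         if predict[i] == 0 or predict[i] == 1:
--             continue
--         if i == 0:
--             pred.append(predict[i])
--         if i > 0 and predict[i] != predict[i-1]:
--             if len(pred) == 0:
--                 pred.append(predict[i])
--             elif predict[i] != pred[-1]:
--                 pred.append(predict[i])
--     return pred
-- ===== SOURCE B (Python) =====
-- def preprocess_predict(predict, input_size):
--     xs = predict[:input_size]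
--
--     def prev_nonblank(i):
--         # nearest non-blank element strictly before index i, scanning backwards
--         for j in range(i - 1, -1, -1):
--             if xs[j] != 0 and xs[j] != 1:
--                 return xs[j]
--         return None
--
--     return [xs[i] for i in range(len(xs))
--             if xs[i] != 0 and xs[i] != 1 and prev_nonblank(i) != xs[i]]
-- ===== Notes on version B (the rewrite author's own statement) =====
-- stated objective: alternative
-- what changed: A's single stateful accumulator scan is replaced by a stateless per-index rule: emit predict[i] (within the slice) iff it is non-blank and the nearest preceding non-blank element, found by an inner backward scan at each index, differs from it - nested O(n^2) lookups instead of one pass with collapse state.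
import Mathlib
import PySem

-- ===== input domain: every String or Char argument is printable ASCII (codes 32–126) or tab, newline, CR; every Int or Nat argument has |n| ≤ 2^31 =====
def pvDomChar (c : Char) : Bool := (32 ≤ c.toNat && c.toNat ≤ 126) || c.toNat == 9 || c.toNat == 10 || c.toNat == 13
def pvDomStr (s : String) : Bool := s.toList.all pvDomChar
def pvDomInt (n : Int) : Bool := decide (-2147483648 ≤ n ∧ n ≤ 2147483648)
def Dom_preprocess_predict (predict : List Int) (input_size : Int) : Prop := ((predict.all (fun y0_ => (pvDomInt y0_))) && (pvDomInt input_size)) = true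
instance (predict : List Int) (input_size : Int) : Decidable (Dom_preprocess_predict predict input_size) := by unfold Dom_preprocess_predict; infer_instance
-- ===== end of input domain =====

-- B replaces A's single stateful accumulator scan by a stateless per-index rule (emit an element
-- iff non-blank and the nearest preceding non-blank found by an inner backward scan differs);
-- an O(n^2) alternative decomposition, equal output.


-- ===== PORT A =====
-- loop body of A, extracted as a helper (step for step the Python body).
-- Indexing: predict[i] and predict[i-1] are always in range when read
-- (0 ≤ i < len(predict[:input_size]) ≤ len(predict); predict[i-1] only when i > 0),
-- and pred[-1] is only read after len(pred) == 0 was ruled out, so the `.getD 0`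
-- defaults are never used.
def pvBodyA (predict : List Int) (pred : List Int) (i : Int) : List Int :=
  let pi := (PySem.List.pyGet? predict i).getD 0
  if pi = 0 ∨ pi = 1 then pred
  else
    let pred1 := if i = 0 then pred ++ [pi] else pred
    if 0 < i ∧ pi ≠ (PySem.List.pyGet? predict (i - 1)).getD 0 then
      if pred1.length = 0 then pred1 ++ [pi]
      else if pi ≠ (PySem.List.pyGet? pred1 (-1)).getD 0 then pred1 ++ [pi]
      else pred1
    else pred1

def preprocess_predict (predict : List Int) (input_size : Int) : List Int :=
  (PySem.List.pyRange 0 (((PySem.List.slice predict none (some input_size)).length : Int)) 1).foldl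
    (pvBodyA predict) []

-- ===== PORT B =====
-- prev_nonblank(i): backward scan over j = i-1, i-2, …, 0, returning the first non-blank xs[j]
-- (the `.getD 0` default is never used: j < i ≤ len xs).
def pvPrevNB (xs : List Int) : Nat → Option Int
  | 0 => none
  | j + 1 =>
    let x := xs.getD j 0
    if x ≠ 0 ∧ x ≠ 1 then some x else pvPrevNB xs j

def preprocess_predict_alt (predict : List Int) (input_size : Int) : List Int :=
  let xs := PySem.List.slice predict none (some input_size)
  (List.range xs.length).filterMap (fun i =>
    let x := xs.getD i 0
    if x ≠ 0 ∧ x ≠ 1 ∧ pvPrevNB xs i ≠ some x then some x else none)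

-- ===== PRECONDITION & SPEC =====
def Spec_preprocess_predict (predict : List Int) (input_size : Int) (out : List Int) : Prop := out = preprocess_predict_alt predict input_size
instance (predict : List Int) (input_size : Int) (out : List Int) : Decidable (Spec_preprocess_predict predict input_size out) := by unfold Spec_preprocess_predict; infer_instance

-- ===== CLAIM (what is proved, stated in full; the proofs are below) =====
def Claim_equal_preprocess_predict : Prop := ∀ (predict : List Int) (input_size : Int), Dom_preprocess_predict predict input_size → Spec_preprocess_predict predict input_size (preprocess_predict predict input_size)

-- ===== LEMMAS AND PROOFS =====
-- Both programs are shown equal to the common normal form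
-- pvCollapse (xs.filter nonblank), xs = predict[:input_size].

def pvCollapse : List Int → List Int
  | [] => []
  | [x] => [x]
  | x :: y :: t => if x = y then pvCollapse (y :: t) else x :: pvCollapse (y :: t)

lemma getLast?_cons_ne_nil (a : Int) (m : List Int) (h : m ≠ []) :
    (a :: m).getLast? = m.getLast? := by
  cases m with
  | nil => simp at h
  | cons b t => simp [List.getLast?_cons_cons]

lemma pvCollapse_eq_nil_iff (l : List Int) : pvCollapse l = [] ↔ l = [] := by
  induction l using pvCollapse.induct with
  | case1 => simp [pvCollapse]
  | case2 x => simp [pvCollapse]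
  | case3 y t ih => simp [pvCollapse, ih]
  | case4 x y t h ih => simp [pvCollapse, h]

lemma pvCollapse_dup_cons (y : Int) (t : List Int) :
    pvCollapse (y :: y :: t) = pvCollapse (y :: t) := by simp [pvCollapse]

lemma pvCollapse_ne_cons (x y : Int) (t : List Int) (h : x ≠ y) :
    pvCollapse (x :: y :: t) = x :: pvCollapse (y :: t) := by simp [pvCollapse, h]

lemma pvCollapse_getLast? (l : List Int) : (pvCollapse l).getLast? = l.getLast? := by
  induction l using pvCollapse.induct with
  | case1 => simp [pvCollapse]
  | case2 x => simp [pvCollapse]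
  | case3 y t ih =>
    rw [pvCollapse_dup_cons, ih, getLast?_cons_ne_nil y (y :: t) (by simp)]
  | case4 x y t h ih =>
    rw [pvCollapse_ne_cons x y t h,
      getLast?_cons_ne_nil x (pvCollapse (y :: t)) (by simp [pvCollapse_eq_nil_iff]), ih,
      getLast?_cons_ne_nil x (y :: t) (by simp)]

lemma pvCollapse_append_singleton (l : List Int) (x : Int) :
    pvCollapse (l ++ [x]) = if l.getLast? = some x then pvCollapse l else pvCollapse l ++ [x] := by
  induction l using pvCollapse.induct with
  | case1 => simp [pvCollapse]
  | case2 a =>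
    by_cases h : a = x
    · simp [pvCollapse, h]
    · simp [pvCollapse, h]
  | case3 y t ih =>
    rw [show (y :: y :: t) ++ [x] = y :: y :: (t ++ [x]) by simp,
      pvCollapse_dup_cons, show y :: (t ++ [x]) = (y :: t) ++ [x] by simp, ih,
      getLast?_cons_ne_nil y (y :: t) (by simp), pvCollapse_dup_cons]
  | case4 a y t h ih =>
    rw [show (a :: y :: t) ++ [x] = a :: ((y :: t) ++ [x]) by simp,
      show pvCollapse (a :: ((y :: t) ++ [x])) = a :: pvCollapse ((y :: t) ++ [x]) from
        pvCollapse_ne_cons a y (t ++ [x]) h, ih,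
      getLast?_cons_ne_nil a (y :: t) (by simp), pvCollapse_ne_cons a y t h]
    split <;> simp

lemma pvSlice_is_take_proof (predict : List Int) (b : Int) :
    ∃ m : Nat, PySem.List.slice predict none (some b) = predict.take m := by
  cases b with
  | ofNat n =>
    refine ⟨n, ?_⟩
    rw [show Int.ofNat n = (n : Int) from rfl,
      PySem.List.slice_to predict (Int.natCast_nonneg n)]
    simp
  | negSucc k =>
    exact ⟨predict.length - (k + 1), by
      rw [show Int.negSucc k = -((k + 1 : Nat) : Int) by simp [Int.negSucc_eq],
        PySem.List.slice_to_neg_natCast predict (k + 1) (by omega)]⟩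

-- ---- A's loop equals the normal form (loop invariant) ----
lemma pvStep_eq (predict : List Int) (m : Nat) (j : Nat)
    (hj : j < (predict.take m).length) :
    pvBodyA predict
        (pvCollapse (((predict.take m).take j).filter (fun x => decide (x ≠ 0 ∧ x ≠ 1)))) (j : Int) =
      pvCollapse (((predict.take m).take (j + 1)).filter (fun x => decide (x ≠ 0 ∧ x ≠ 1))) := by
  have hjp : j < predict.length := lt_of_lt_of_le hj (by simp)
  have hget : PySem.List.pyGet? predict (j : Int) = some predict[j] := by
    rw [PySem.List.pyGet?_natCast]; exact List.getElem?_eq_getElem hjp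
  have hsj : (predict.take m)[j] = predict[j] := List.getElem_take
  have htake : (predict.take m).take (j + 1) = (predict.take m).take j ++ [predict[j]] := by
    rw [List.take_add_one, List.getElem?_eq_getElem hj, hsj]; rfl
  rw [htake, List.filter_append]
  by_cases hq : predict[j] = 0 ∨ predict[j] = 1
  · have hfx : [predict[j]].filter (fun x => decide (x ≠ 0 ∧ x ≠ 1)) = [] := by
      rcases hq with h | h <;> simp [h]
    rw [hfx, List.append_nil]
    unfold pvBodyA
    rw [hget]
    simp only [Option.getD_some]
    rw [if_pos hq]
  · have hfx : [predict[j]].filter (fun x => decide (x ≠ 0 ∧ x ≠ 1)) = [predict[j]] := by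
      simp [not_or] at hq; simp [hq.1, hq.2]
    rw [hfx, pvCollapse_append_singleton]
    unfold pvBodyA
    rw [hget]
    simp only [Option.getD_some]
    rw [if_neg hq]
    rcases Nat.eq_zero_or_pos j with hj0 | hj0
    · subst hj0
      simp [pvCollapse]
    · have hj1p : j - 1 < predict.length := by omega
      have hprev : PySem.List.pyGet? predict ((j : Int) - 1) = some predict[j - 1] := by
        rw [show (j : Int) - 1 = ((j - 1 : Nat) : Int) by omega, PySem.List.pyGet?_natCast]
        exact List.getElem?_eq_getElem hj1p
      rw [if_neg (show ¬((j : Int) = 0) by omega), hprev]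
      simp only [Option.getD_some]
      by_cases hxy : predict[j] = predict[j - 1]
      · rw [if_neg (fun h => h.2 hxy)]
        obtain ⟨k, rfl⟩ : ∃ k, j = k + 1 := ⟨j - 1, by omega⟩
        simp only [Nat.add_sub_cancel] at hxy ⊢
        have hkm : k < (predict.take m).length := by omega
        have htakej : (predict.take m).take (k + 1) = (predict.take m).take k ++ [predict[k]] := by
          rw [List.take_add_one, List.getElem?_eq_getElem hkm, List.getElem_take]
          rfl
        have hlast : (((predict.take m).take (k + 1)).filter
            (fun x => decide (x ≠ 0 ∧ x ≠ 1))).getLast? = some predict[k] := by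
          rw [htakej, List.filter_append]
          simp only [not_or] at hq
          have h0 : ¬(predict[k] = 0) := by omega
          have h1 : ¬(predict[k] = 1) := by omega
          have hone : [predict[k]].filter (fun x => decide (x ≠ 0 ∧ x ≠ 1)) = [predict[k]] := by
            simp [h0, h1]
          rw [hone, List.getLast?_concat]
        rw [hlast]
        simp only [hxy]
        split
        · rfl
        · next h => exact absurd rfl h
      · rw [if_pos ⟨by positivity, hxy⟩]
        by_cases hF : ((predict.take m).take j).filter (fun x => decide (x ≠ 0 ∧ x ≠ 1)) = []
        · rw [hF]
          simp [pvCollapse]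
        · have hcne : pvCollapse (((predict.take m).take j).filter
              (fun x => decide (x ≠ 0 ∧ x ≠ 1))) ≠ [] := by
            rw [ne_eq, pvCollapse_eq_nil_iff]; exact hF
          rw [if_neg (fun hlen => hcne (List.length_eq_zero_iff.mp hlen))]
          obtain ⟨v, hv⟩ := Option.isSome_iff_exists.mp (List.getLast?_isSome.mpr hF)
          rw [hv, PySem.List.pyGet?_neg_one, pvCollapse_getLast?, hv]
          simp only [Option.getD_some]
          by_cases hxv : predict[j] = v
          · rw [if_neg (by simp [hxv]), if_pos (by rw [hxv])]
          · rw [if_pos hxv, if_neg (by simp; exact fun h => hxv h.symm)]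

lemma pvLoop_inv (predict : List Int) (m : Nat) (j : Nat)
    (hj : j ≤ (predict.take m).length) :
    (PySem.List.pyRange 0 (j : Int) 1).foldl (pvBodyA predict) [] =
      pvCollapse (((predict.take m).take j).filter (fun x => decide (x ≠ 0 ∧ x ≠ 1))) := by
  induction j with
  | zero => simp [pvCollapse]
  | succ k ih =>
    rw [show ((k + 1 : Nat) : Int) = (k : Int) + 1 by push_cast; ring,
      PySem.List.pyRange_one_succ_right (by positivity), List.foldl_append,
      ih (by omega)]
    simpa using pvStep_eq predict m k (by omega)

-- ---- B's per-index rule equals the normal form ----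
lemma pvPrevNB_eq_getLast? (xs : List Int) (n : Nat) (hn : n ≤ xs.length) :
    pvPrevNB xs n = ((xs.take n).filter (fun x => decide (x ≠ 0 ∧ x ≠ 1))).getLast? := by
  induction n with
  | zero => simp [pvPrevNB]
  | succ k ih =>
    have hk : k < xs.length := by omega
    have hget : xs.getD k 0 = xs[k] := by simp [List.getD, List.getElem?_eq_getElem hk]
    have htake : xs.take (k + 1) = xs.take k ++ [xs[k]] := by
      rw [List.take_add_one, List.getElem?_eq_getElem hk]; rfl
    rw [htake, List.filter_append]
    unfold pvPrevNB
    rw [hget]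
    by_cases h : xs[k] ≠ 0 ∧ xs[k] ≠ 1
    · rw [if_pos h]
      have : [xs[k]].filter (fun x => decide (x ≠ 0 ∧ x ≠ 1)) = [xs[k]] := by
        simp [h.1, h.2]
      rw [this, List.getLast?_concat]
    · rw [if_neg h]
      have : [xs[k]].filter (fun x => decide (x ≠ 0 ∧ x ≠ 1)) = [] := by
        simp only [not_and_or, not_not] at h
        rcases h with h | h <;> simp [h]
      rw [this, List.append_nil, ih (by omega)]

lemma pvAlt_inv (xs : List Int) (n : Nat) (hn : n ≤ xs.length) :
    (List.range n).filterMap (fun i =>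
        let x := xs.getD i 0
        if x ≠ 0 ∧ x ≠ 1 ∧ pvPrevNB xs i ≠ some x then some x else none) =
      pvCollapse ((xs.take n).filter (fun x => decide (x ≠ 0 ∧ x ≠ 1))) := by
  induction n with
  | zero => simp [pvCollapse]
  | succ k ih =>
    have hk : k < xs.length := by omega
    have hget : xs.getD k 0 = xs[k] := by simp [List.getD, List.getElem?_eq_getElem hk]
    have htake : xs.take (k + 1) = xs.take k ++ [xs[k]] := by
      rw [List.take_add_one, List.getElem?_eq_getElem hk]; rfl
    rw [List.range_succ, List.filterMap_append, ih (by omega), htake, List.filter_append]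
    by_cases hq : xs[k] ≠ 0 ∧ xs[k] ≠ 1
    · have hfx : [xs[k]].filter (fun x => decide (x ≠ 0 ∧ x ≠ 1)) = [xs[k]] := by
        simp [hq.1, hq.2]
      rw [hfx, pvCollapse_append_singleton,
        ← pvPrevNB_eq_getLast? xs k (by omega)]
      by_cases hp : pvPrevNB xs k = some xs[k]
      · have hFM : List.filterMap (fun i =>
            let x := xs.getD i 0
            if x ≠ 0 ∧ x ≠ 1 ∧ pvPrevNB xs i ≠ some x then some x else none) [k] = [] := by
          simp only [List.filterMap_cons, List.filterMap_nil, hget]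
          rw [if_neg (fun h => h.2.2 hp)]
        rw [hFM, List.append_nil, if_pos hp]
      · have hFM : List.filterMap (fun i =>
            let x := xs.getD i 0
            if x ≠ 0 ∧ x ≠ 1 ∧ pvPrevNB xs i ≠ some x then some x else none) [k] = [xs[k]] := by
          simp only [List.filterMap_cons, List.filterMap_nil, hget]
          rw [if_pos ⟨hq.1, hq.2, hp⟩]
        rw [hFM, if_neg hp]
    · have hfx : [xs[k]].filter (fun x => decide (x ≠ 0 ∧ x ≠ 1)) = [] := by
        simp only [not_and_or, not_not] at hq
        rcases hq with h | h <;> simp [h]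
      have hFM : List.filterMap (fun i =>
          let x := xs.getD i 0
          if x ≠ 0 ∧ x ≠ 1 ∧ pvPrevNB xs i ≠ some x then some x else none) [k] = [] := by
        simp only [List.filterMap_cons, List.filterMap_nil, hget]
        rw [if_neg (fun h => hq ⟨h.1, h.2.1⟩)]
      rw [hFM, hfx, List.append_nil, List.append_nil]

-- ===== VERDICT (by name: the statement is the Claim_ definition above) =====
theorem preprocess_predict_spec : Claim_equal_preprocess_predict := by
  intro predict input_size _
  unfold Spec_preprocess_predict preprocess_predict preprocess_predict_alt
  obtain ⟨m, hm⟩ := pvSlice_is_take_proof predict input_size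
  rw [hm]
  have hA := pvLoop_inv predict m (predict.take m).length le_rfl
  have hB := pvAlt_inv (predict.take m) (predict.take m).length le_rfl
  rw [List.take_length] at hA hB
  rw [hA]
  exact hB.symm
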